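-- pv_equiv track=rewrite | github.com/dhruvchawla1996/csc411_a3 | logistic_classifier.py | word_to_index_builder
-- ===== SOURCE A (Python) =====
-- def word_to_index_builder(training_set, validation_set, testing_set):
--     """
--     Build a mapping of word -> unique number
--
--     PARAMETERS
--     ----------
--     training_set: list of list of strings
--         contains headlines broken into words
--
--     validation_set: list of list of strings
--         contains headlines broken into words
--
--     testing_set: list of list of strings
--         contains headlines broken into words
--
--     RETURNS
--     -------
--     word_dict: {string, int}
--         Matches word in training_set, validation_set, testing_set to a unique count number
--
--     total_unique_words: int
--         total number of unique words in training_set, validation_set, testing_set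
--     """
--     word_dict = {}
--     i = 0
--
--     for headline in training_set+validation_set+testing_set:
--         for word in headline:
--             if word not in word_dict:
--                 word_dict[word] = i
--                 i += 1
--
--     return word_dict, i
-- ===== SOURCE B (Python) =====
-- def word_to_index_builder(training_set, validation_set, testing_set):
--     words = [word for headline in training_set + validation_set + testing_set for word in headline]
--     # backwards sweep: earlier positions overwrite later ones, leaving first positions
--     first_pos = {}
--     for p, word in reversed(list(enumerate(words))):
--         first_pos[word] = p
--     # first-occurrence order recovered by sorting the distinct words by first position
--     unique_words = sorted(first_pos, key=lambda w: first_pos[w])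
--     word_dict = {word: i for i, word in enumerate(unique_words)}
--     return word_dict, len(word_dict)
-- ===== Notes on version B (the rewrite author's own statement) =====
-- stated objective: alternative
-- what changed: Instead of A's single forward pass with a manual running counter, B sweeps the flattened word list backwards to build a word-to-first-position table (earlier writes overwrite later ones), then recovers first-occurrence order by sorting the distinct words by first position and enumerating them.
import Mathlib
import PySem

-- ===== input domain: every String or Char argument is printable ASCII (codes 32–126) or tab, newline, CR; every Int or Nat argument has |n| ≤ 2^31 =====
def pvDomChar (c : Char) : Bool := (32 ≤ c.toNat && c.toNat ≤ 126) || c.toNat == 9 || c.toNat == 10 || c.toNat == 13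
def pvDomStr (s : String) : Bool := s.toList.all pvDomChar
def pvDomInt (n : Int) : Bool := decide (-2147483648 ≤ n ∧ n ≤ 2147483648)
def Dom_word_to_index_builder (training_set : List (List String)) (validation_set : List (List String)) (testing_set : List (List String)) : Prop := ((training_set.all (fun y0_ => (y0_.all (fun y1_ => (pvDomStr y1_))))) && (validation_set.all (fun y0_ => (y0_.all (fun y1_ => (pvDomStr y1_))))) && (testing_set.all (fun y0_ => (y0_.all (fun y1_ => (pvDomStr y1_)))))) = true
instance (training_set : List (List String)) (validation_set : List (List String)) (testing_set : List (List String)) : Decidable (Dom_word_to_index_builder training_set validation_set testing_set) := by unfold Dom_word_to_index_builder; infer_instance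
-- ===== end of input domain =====

-- B replaces A's single forward counter pass by a backwards first-position table plus a sort by first position; objective: alternative.


-- ===== PORT A =====
-- one pass over all headlines: insert each unseen word with the running counter i
def word_to_index_builder (training_set : List (List String)) (validation_set : List (List String)) (testing_set : List (List String)) : (List (String × Int)) × Int :=
  let st :=
    (training_set ++ validation_set ++ testing_set).foldl
      (fun (st : PySem.Dict String Int × Int) headline =>
        headline.foldl
          (fun st word =>
            if st.1.contains word then st else (st.1.insert word st.2, st.2 + 1))
          st)
      (PySem.Dict.empty, 0)
  (st.1.items, st.2)

-- ===== PORT B =====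
-- backwards sweep building word → first position, then sort the distinct words by first position and enumerate
def word_to_index_builder_alt (training_set : List (List String)) (validation_set : List (List String)) (testing_set : List (List String)) : (List (String × Int)) × Int :=
  let words := (training_set ++ validation_set ++ testing_set).flatMap (fun headline => headline)
  let first_pos :=
    ((PySem.List.enumerate words).reverse).foldl
      (fun (d : PySem.Dict String Int) p => d.insert p.2 p.1) PySem.Dict.empty
  let unique_words := PySem.List.sorted first_pos.keys (fun w => first_pos.getD w 0) false
  let word_dict := (PySem.List.enumerate unique_words).map (fun p => (p.2, p.1))
  (word_dict, (word_dict.length : Int))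

-- ===== PRECONDITION & SPEC =====
def Spec_word_to_index_builder (training_set : List (List String)) (validation_set : List (List String)) (testing_set : List (List String)) (out : (List (String × Int)) × Int) : Prop := out = word_to_index_builder_alt training_set validation_set testing_set
instance (training_set : List (List String)) (validation_set : List (List String)) (testing_set : List (List String)) (out : (List (String × Int)) × Int) : Decidable (Spec_word_to_index_builder training_set validation_set testing_set out) := by unfold Spec_word_to_index_builder; infer_instance

-- ===== CLAIM (what is proved, stated in full; the proofs are below) =====
def Claim_equal_word_to_index_builder : Prop := ∀ (training_set : List (List String)) (validation_set : List (List String)) (testing_set : List (List String)), Dom_word_to_index_builder training_set validation_set testing_set → Spec_word_to_index_builder training_set validation_set testing_set (word_to_index_builder training_set validation_set testing_set)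

-- ===== LEMMAS AND PROOFS =====

-- A's loop state after the set of words seen so far is u (first occurrences, in order)
def pvState (u : List String) : PySem.Dict String Int × Int :=
  (PySem.Dict.mk ((PySem.List.enumerate u).map (fun p => (p.2, p.1))), (u.length : Int))

-- A's inner loop body
def pvStep (st : PySem.Dict String Int × Int) (word : String) : PySem.Dict String Int × Int :=
  if st.1.contains word then st else (st.1.insert word st.2, st.2 + 1)

lemma pvState_keys (u : List String) : (pvState u).1.keys = u := by
  simp [pvState, PySem.Dict.keys_mk, List.map_map, Function.comp_def, PySem.List.map_snd_enumerate]

lemma pvState_contains (u : List String) (w : String) : (pvState u).1.contains w = u.contains w := by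
  rw [PySem.Dict.contains_eq_decide_mem_keys, pvState_keys]
  simp

lemma pvStep_state (u : List String) (w : String) :
    pvStep (pvState u) w = pvState (PySem.Set.add u w) := by
  by_cases h : w ∈ u
  · simp [pvStep, pvState_contains, PySem.Set.add, PySem.Set.contains, h]
  · unfold pvStep
    rw [pvState_contains]
    simp only [PySem.Set.add, PySem.Set.contains]
    simp only [List.contains_eq_mem, h, decide_false, Bool.false_eq_true, if_false]
    refine Prod.ext ?_ ?_
    · apply PySem.Dict.ext
      rw [PySem.Dict.items_insert_of_not_contains]
      · show _ ++ _ = (PySem.Dict.mk ((PySem.List.enumerate (u ++ [w])).map _)).items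
        simp [pvState, PySem.List.enumerate_append, PySem.List.enumerate_cons,
              PySem.List.enumerate_nil]
      · rw [pvState_contains]; simp [h]
    · simp [pvState]

lemma pvFold_state (ws : List String) (u : List String) :
    ws.foldl pvStep (pvState u) = pvState (PySem.Set.update u ws) := by
  induction ws generalizing u with
  | nil => simp [PySem.Set.update]
  | cons w ws ih => simp [PySem.Set.update] at ih ⊢; rw [pvStep_state, ih]

lemma pvFold_headlines (hs : List (List String)) (st : PySem.Dict String Int × Int) :
    hs.foldl (fun st h => h.foldl pvStep st) st = (hs.flatMap (fun h => h)).foldl pvStep st := by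
  induction hs generalizing st with
  | nil => rfl
  | cons h hs ih => simp [List.flatMap_cons, List.foldl_append, ih]

-- B's backwards dict: lookup is the first position of the word
lemma pvRevFold_get? (xs : List String) (s : Int) (w : String) :
    ((PySem.List.enumerate xs s).foldr
        (fun p (d : PySem.Dict String Int) => d.insert p.2 p.1) PySem.Dict.empty).get? w
      = Option.map (fun k : Nat => s + (k : Int)) (PySem.List.index? xs w) := by
  induction xs generalizing s with
  | nil => simp [PySem.List.enumerate_nil, PySem.List.index?_eq_idxOf?]
  | cons x xs ih =>
    rw [PySem.List.enumerate_cons]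
    simp only [List.foldr_cons]
    by_cases h : w = x
    · subst h
      rw [PySem.Dict.get?_insert_self, PySem.List.index?_cons_self]
      simp
    · rw [PySem.Dict.get?_insert_of_ne _ _ h, ih, PySem.List.index?_cons_of_ne _ (fun e => h e.symm)]
      cases PySem.List.index? xs w with
      | none => rfl
      | some k =>
        simp only [Option.map_some]
        congr 1
        push_cast
        ring

lemma pvRevFold_keys (xs : List String) (s : Int) :
    ((PySem.List.enumerate xs s).reverse.foldl
        (fun (d : PySem.Dict String Int) p => d.insert p.2 p.1) PySem.Dict.empty).keys
      = PySem.Set.ofList xs.reverse := by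
  rw [PySem.Dict.keys_foldl_insert_key ((PySem.List.enumerate xs s).reverse) (fun p => p.2) (fun d p => p.1) PySem.Dict.empty]
  rw [PySem.Dict.keys_empty, PySem.Set.update_nil_left]
  congr 1
  rw [List.map_reverse, PySem.List.map_snd_enumerate]

-- first occurrences are in strictly increasing first-position order
lemma pvDedup_pairwise (xs : List String) :
    (PySem.Set.ofList xs).Pairwise
      (fun a b => (PySem.List.index? xs a).getD 0 < (PySem.List.index? xs b).getD 0) := by
  induction xs using List.reverseRecOn with
  | nil => simp [PySem.Set.ofList]
  | append_singleton xs x ih =>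
    rw [PySem.Set.ofList_append_singleton]
    by_cases hx : x ∈ PySem.Set.ofList xs
    · rw [PySem.Set.add_of_mem hx]
      refine ih.imp_of_mem ?_
      intro a b ha hb hab
      have ha' : a ∈ xs := (PySem.Set.mem_ofList _ _).1 ha
      have hb' : b ∈ xs := (PySem.Set.mem_ofList _ _).1 hb
      rwa [PySem.List.index?_append_of_mem _ ha', PySem.List.index?_append_of_mem _ hb']
    · rw [PySem.Set.add_of_not_mem hx]
      rw [List.pairwise_append]
      refine ⟨?_, List.pairwise_singleton _ _, ?_⟩
      · refine ih.imp_of_mem ?_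
        intro a b ha hb hab
        have ha' : a ∈ xs := (PySem.Set.mem_ofList _ _).1 ha
        have hb' : b ∈ xs := (PySem.Set.mem_ofList _ _).1 hb
        rwa [PySem.List.index?_append_of_mem _ ha', PySem.List.index?_append_of_mem _ hb']
      · intro a ha b hb
        have ha' : a ∈ xs := (PySem.Set.mem_ofList _ _).1 ha
        have hx' : x ∉ xs := fun h => hx ((PySem.Set.mem_ofList _ _).2 h)
        rw [List.mem_singleton] at hb
        subst hb
        rw [PySem.List.index?_append_of_mem _ ha',
            PySem.List.index?_append_singleton_self xs b hx']
        obtain ⟨k, hk⟩ := Option.isSome_iff_exists.1 ((PySem.List.index?_isSome_iff _ _).2 ha')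
        obtain ⟨hlt, _, _⟩ := PySem.List.getElem_of_index?_eq_some hk
        rw [hk]
        simpa using hlt

-- B's sorted list of distinct words is the first-occurrence dedup
lemma pvSorted_eq_dedup (xs : List String) :
    PySem.List.sorted
      (((PySem.List.enumerate xs).reverse.foldl
          (fun (d : PySem.Dict String Int) p => d.insert p.2 p.1) PySem.Dict.empty).keys)
      (fun w => ((PySem.List.enumerate xs).reverse.foldl
          (fun (d : PySem.Dict String Int) p => d.insert p.2 p.1) PySem.Dict.empty).getD w 0)
      = PySem.List.dedup xs := by
  have hget : ∀ w, ((PySem.List.enumerate xs).reverse.foldl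
      (fun (d : PySem.Dict String Int) p => d.insert p.2 p.1) PySem.Dict.empty).get? w
      = Option.map (fun k : Nat => (k : Int)) (PySem.List.index? xs w) := by
    intro w
    rw [List.foldl_reverse]
    have := pvRevFold_get? xs 0 w
    simp only [zero_add] at this
    exact this
  rw [PySem.List.dedup_eq_ofList]
  apply PySem.List.sorted_eq_of_perm_of_pairwise_lt
  · rw [pvRevFold_keys]
    apply (List.perm_ext_iff_of_nodup (PySem.Set.nodup_ofList _) (PySem.Set.nodup_ofList _)).2
    intro a
    rw [PySem.Set.mem_ofList, PySem.Set.mem_ofList, List.mem_reverse]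
  · refine (pvDedup_pairwise xs).imp_of_mem ?_
    intro a b ha hb hab
    have ha' : a ∈ xs := (PySem.Set.mem_ofList _ _).1 ha
    have hb' : b ∈ xs := (PySem.Set.mem_ofList _ _).1 hb
    obtain ⟨ka, hka⟩ := Option.isSome_iff_exists.1 ((PySem.List.index?_isSome_iff _ _).2 ha')
    obtain ⟨kb, hkb⟩ := Option.isSome_iff_exists.1 ((PySem.List.index?_isSome_iff _ _).2 hb')
    rw [PySem.Dict.getD_eq_get?_getD, PySem.Dict.getD_eq_get?_getD, hget, hget, hka, hkb]
    rw [hka, hkb] at hab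
    simp at hab ⊢
    exact_mod_cast hab

-- ===== VERDICT (by name: the statement is the Claim_ definition above) =====
theorem word_to_index_builder_spec : Claim_equal_word_to_index_builder := by
  intro tr va te _
  unfold Spec_word_to_index_builder word_to_index_builder word_to_index_builder_alt
  have h0 : pvState [] = (PySem.Dict.empty, 0) := rfl
  show ((((tr ++ va ++ te).foldl (fun st h => h.foldl pvStep st) (PySem.Dict.empty, 0)).1.items,
        ((tr ++ va ++ te).foldl (fun st h => h.foldl pvStep st) (PySem.Dict.empty, 0)).2)) = _
  rw [← h0, pvFold_headlines, pvFold_state]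
  simp only [pvSorted_eq_dedup]
  have hset : PySem.Set.update ([] : List String) ((tr ++ va ++ te).flatMap (fun h => h))
      = PySem.List.dedup ((tr ++ va ++ te).flatMap (fun h => h)) := by
    simp [PySem.List.dedup_eq_ofList, PySem.Set.ofList_eq_foldl, PySem.Set.update]
  rw [hset]
  simp [pvState, PySem.List.length_enumerate]
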